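-- pv_equiv track=rewrite | github.com/SoraK93/dsa-gfg-full-course | DSA/Hashing/intersection_of_two_array.py | one_set_intersection
-- ===== SOURCE A (Python) =====
-- def one_set_intersection(arr1, arr2):
--     '''Create one set and compare with the other array to find the intersection'''
--     set_1 = set(arr1)
--
--     res = 0
--     for i in range(len(arr2)-1, -1, -1):
--         if arr2[i] in set_1:
--             res += 1
--             set_1.remove(arr2[i])
--
--     return res
-- ===== SOURCE B (Python) =====
-- def one_set_intersection(arr1, arr2):
--     '''Sort deduped copies of both arrays, then count common values with a two-pointer merge'''
--     a = sorted(set(arr1))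
--     b = sorted(set(arr2))
--     i = j = res = 0
--     while i < len(a) and j < len(b):
--         if a[i] < b[j]:
--             i += 1
--         elif b[j] < a[i]:
--             j += 1
--         else:
--             res += 1
--             i += 1
--             j += 1
--     return res
-- ===== Notes on version B (the rewrite author's own statement) =====
-- stated objective: alternative
-- what changed: Replaced the hash-set membership-and-remove scan with sorting both deduplicated arrays and counting common values by a two-pointer merge.
import Mathlib
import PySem

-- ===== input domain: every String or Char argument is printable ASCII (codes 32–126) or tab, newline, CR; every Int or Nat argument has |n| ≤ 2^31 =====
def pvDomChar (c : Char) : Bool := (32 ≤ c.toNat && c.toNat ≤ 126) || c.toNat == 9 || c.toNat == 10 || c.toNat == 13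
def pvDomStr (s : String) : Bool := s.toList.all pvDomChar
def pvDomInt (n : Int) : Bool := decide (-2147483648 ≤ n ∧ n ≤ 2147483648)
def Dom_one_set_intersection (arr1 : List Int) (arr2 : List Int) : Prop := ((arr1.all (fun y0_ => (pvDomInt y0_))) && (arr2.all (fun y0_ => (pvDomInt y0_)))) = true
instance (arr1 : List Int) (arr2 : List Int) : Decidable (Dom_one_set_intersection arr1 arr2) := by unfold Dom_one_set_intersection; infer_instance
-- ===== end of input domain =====

-- B replaces A's hash-set membership-and-remove scan with sorting both deduplicated
-- arrays and a two-pointer merge that counts the common values; objective: alternative.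

-- ===== PORT A =====
-- set_1.remove(x) is only executed under 'if x in set_1', where it equals Set.discard (exact).
def one_set_intersection (arr1 : List Int) (arr2 : List Int) : Int :=
  ((PySem.List.pyRange ((arr2.length : Int) - 1) (-1) (-1)).foldl
    (fun (st : Int × PySem.Set Int) i =>
      if PySem.Set.contains st.2 (PySem.List.pyGetD arr2 i 0) then
        (st.1 + 1, PySem.Set.discard st.2 (PySem.List.pyGetD arr2 i 0))
      else st) ((0 : Int), PySem.Set.ofList arr1)).1

-- ===== PORT B =====
-- B's while loop with two advancing indices, as structural recursion on the sorted lists.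
def pvMergeCount : List Int → List Int → Int
  | [], _ => 0
  | _ :: _, [] => 0
  | x :: xs, y :: ys =>
      if x < y then pvMergeCount xs (y :: ys)
      else if y < x then pvMergeCount (x :: xs) ys
      else 1 + pvMergeCount xs ys

def one_set_intersection_alt (arr1 : List Int) (arr2 : List Int) : Int :=
  pvMergeCount (PySem.List.sorted (PySem.Set.ofList arr1) (fun x => x) false)
               (PySem.List.sorted (PySem.Set.ofList arr2) (fun x => x) false)

-- ===== PRECONDITION & SPEC =====
def Spec_one_set_intersection (arr1 : List Int) (arr2 : List Int) (out : Int) : Prop := out = one_set_intersection_alt arr1 arr2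
instance (arr1 : List Int) (arr2 : List Int) (out : Int) : Decidable (Spec_one_set_intersection arr1 arr2 out) := by unfold Spec_one_set_intersection; infer_instance

-- ===== CLAIM (what is proved, stated in full; the proofs are below) =====
def Claim_equal_one_set_intersection : Prop := ∀ (arr1 : List Int) (arr2 : List Int), Dom_one_set_intersection arr1 arr2 → Spec_one_set_intersection arr1 arr2 (one_set_intersection arr1 arr2)

-- ===== LEMMAS AND PROOFS =====

-- The countdown index fold over a list's elements equals a fold over its reverse.
theorem pv_fold_countdown {σ : Type} (g : σ → Int → σ) (l : List Int) (init : σ) :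
    (PySem.List.pyRange ((l.length : Int) - 1) (-1) (-1)).foldl
      (fun st i => g st (PySem.List.pyGetD l i 0)) init
      = l.reverse.foldl g init := by
  induction l using List.reverseRecOn generalizing init with
  | nil =>
      simp [PySem.List.pyRange_neg_one_eq_nil]
  | append_singleton xs x ih =>
      have hlen : ((xs ++ [x]).length : Int) - 1 = (xs.length : Int) := by
        simp
      rw [hlen, PySem.List.pyRange_neg_one_cons (by omega)]
      simp only [List.foldl_cons]
      have hx : PySem.List.pyGetD (xs ++ [x]) ((xs.length : Int)) 0 = x := by
        have h := PySem.List.pyGetD_natCast (xs ++ [x]) xs.length 0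
        simpa using h
      rw [hx]
      have hcongr : (PySem.List.pyRange ((xs.length : Int) - 1) (-1) (-1)).foldl
          (fun st i => g st (PySem.List.pyGetD (xs ++ [x]) i 0)) (g init x)
          = (PySem.List.pyRange ((xs.length : Int) - 1) (-1) (-1)).foldl
          (fun st i => g st (PySem.List.pyGetD xs i 0)) (g init x) := by
        apply PySem.List.foldl_congr_mem
        intro st i hi
        rcases (PySem.List.mem_pyRange_neg_one).1 hi with ⟨h1, h2⟩
        have h0 : 0 ≤ i := by omega
        have hlt : i.toNat < xs.length := by omega
        have e1 : PySem.List.pyGetD (xs ++ [x]) i 0 = (xs ++ [x]).getD i.toNat 0 := by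
          rw [← Int.toNat_of_nonneg h0]
          exact PySem.List.pyGetD_natCast (xs ++ [x]) i.toNat 0
        have e2 : PySem.List.pyGetD xs i 0 = xs.getD i.toNat 0 := by
          rw [← Int.toNat_of_nonneg h0]
          exact PySem.List.pyGetD_natCast xs i.toNat 0
        rw [e1, e2, List.getD, List.getD, List.getElem?_append_left hlt]
      rw [hcongr, ih]
      simp

-- The loop body of A, as a standalone step function.
def pvStep (st : Int × PySem.Set Int) (x : Int) : Int × PySem.Set Int :=
  if PySem.Set.contains st.2 x then (st.1 + 1, PySem.Set.discard st.2 x) else st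

theorem pv_discard_toFinset (s : List Int) (x : Int) :
    (PySem.Set.discard s x).toFinset = s.toFinset.erase x := by
  ext y
  simp [PySem.Set.discard, Finset.mem_erase, and_comm]

-- Invariant: the loop counts the size of the intersection of the remaining list with s.
theorem pv_loop_count (l : List Int) (s : List Int) (hs : s.Nodup) (res : Int) :
    (l.foldl pvStep (res, s)).1 = res + ((l.toFinset ∩ s.toFinset).card : Int) := by
  induction l generalizing s res with
  | nil => simp
  | cons x l ih =>
      by_cases hx : x ∈ s
      · have hc : PySem.Set.contains s x = true := by
          simpa [PySem.Set.contains] using hx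
        have hnd : (PySem.Set.discard s x).Nodup := List.Nodup.filter _ hs
        rw [List.foldl_cons]
        simp only [pvStep, hc, if_pos]
        rw [ih _ hnd]
        rw [pv_discard_toFinset]
        have h1 : l.toFinset ∩ s.toFinset.erase x = (l.toFinset ∩ s.toFinset).erase x := by
          ext y; simp [Finset.mem_erase, Finset.mem_inter]; tauto
        have h2 : (x :: l).toFinset ∩ s.toFinset = insert x (l.toFinset ∩ s.toFinset) := by
          ext y
          simp only [List.toFinset_cons, Finset.mem_inter, Finset.mem_insert,
            List.mem_toFinset]
          constructor
          · rintro ⟨rfl | h, h'⟩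
            · exact Or.inl rfl
            · exact Or.inr ⟨h, h'⟩
          · rintro (rfl | ⟨h, h'⟩)
            · exact ⟨Or.inl rfl, hx⟩
            · exact ⟨Or.inr h, h'⟩
        rw [h1, h2]
        have h3 : insert x (l.toFinset ∩ s.toFinset)
            = insert x ((l.toFinset ∩ s.toFinset).erase x) := by
          ext y; simp [Finset.mem_insert, Finset.mem_erase]; tauto
        rw [h3, Finset.card_insert_of_notMem (Finset.notMem_erase _ _)]
        push_cast; ring
      · have hc : PySem.Set.contains s x = false := by
          simpa [PySem.Set.contains] using hx
        rw [List.foldl_cons]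
        simp only [pvStep, hc]
        rw [if_neg (by simp), ih _ hs]
        have h2 : (x :: l).toFinset ∩ s.toFinset = l.toFinset ∩ s.toFinset := by
          ext y
          simp only [List.toFinset_cons, Finset.mem_inter, Finset.mem_insert,
            List.mem_toFinset]
          constructor
          · rintro ⟨rfl | h, h'⟩
            · exact absurd h' hx
            · exact ⟨h, h'⟩
          · rintro ⟨h, h'⟩; exact ⟨Or.inr h, h'⟩
        rw [h2]

theorem pv_ofList_toFinset (xs : List Int) :
    (PySem.Set.ofList xs).toFinset = xs.toFinset := by
  ext y; simp [PySem.Set.mem_ofList]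

-- On strictly increasing lists, the two-pointer merge counts the intersection cardinality.
theorem pv_merge_card (a : List Int) : ∀ (b : List Int), a.Pairwise (· < ·) → b.Pairwise (· < ·) →
    pvMergeCount a b = ((a.toFinset ∩ b.toFinset).card : Int) := by
  induction a with
  | nil => intro b _ _; simp [pvMergeCount]
  | cons x xs iha =>
      intro b ha
      induction b with
      | nil => intro _; simp [pvMergeCount]
      | cons y ys ihb =>
          intro hb
          rcases List.pairwise_cons.1 ha with ⟨hxlt, hxs⟩
          rcases List.pairwise_cons.1 hb with ⟨hylt, hys⟩
          by_cases hxy : x < y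
          · have hxnot : ¬(x = y ∨ x ∈ ys) := by
              rintro (rfl | hm)
              · omega
              · exact absurd (hylt x hm) (by omega)
            have hset : (x :: xs).toFinset ∩ (y :: ys).toFinset
                = xs.toFinset ∩ (y :: ys).toFinset := by
              ext z
              simp only [List.toFinset_cons, Finset.mem_inter, Finset.mem_insert,
                List.mem_toFinset]
              constructor
              · rintro ⟨rfl | h, h'⟩
                · exact absurd h' hxnot
                · exact ⟨h, h'⟩
              · rintro ⟨h, h'⟩; exact ⟨Or.inr h, h'⟩
            rw [pvMergeCount, if_pos hxy, iha (y :: ys) hxs hb, hset]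
          · by_cases hyx : y < x
            · have hynot : ¬(y = x ∨ y ∈ xs) := by
                rintro (rfl | hm)
                · omega
                · exact absurd (hxlt y hm) (by omega)
              have hset : (x :: xs).toFinset ∩ (y :: ys).toFinset
                  = (x :: xs).toFinset ∩ ys.toFinset := by
                ext z
                simp only [List.toFinset_cons, Finset.mem_inter, Finset.mem_insert,
                  List.mem_toFinset]
                constructor
                · rintro ⟨h, rfl | h'⟩
                  · exact absurd h hynot
                  · exact ⟨h, h'⟩
                · rintro ⟨h, h'⟩; exact ⟨h, Or.inr h'⟩
              rw [pvMergeCount, if_neg hxy, if_pos hyx, ihb hys, hset]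
            · have hex : x = y := by omega
              subst hex
              have hxxs : x ∉ xs := fun hm => absurd (hxlt x hm) (by omega)
              have hxys : x ∉ ys := fun hm => absurd (hylt x hm) (by omega)
              have hset : (x :: xs).toFinset ∩ (x :: ys).toFinset
                  = insert x (xs.toFinset ∩ ys.toFinset) := by
                ext z
                simp only [List.toFinset_cons, Finset.mem_inter, Finset.mem_insert,
                  List.mem_toFinset]
                constructor
                · rintro ⟨rfl | h, h'⟩
                  · exact Or.inl rfl
                  · rcases h' with rfl | h'
                    · exact Or.inl rfl
                    · exact Or.inr ⟨h, h'⟩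
                · rintro (rfl | ⟨h, h'⟩)
                  · exact ⟨Or.inl rfl, Or.inl rfl⟩
                  · exact ⟨Or.inr h, Or.inr h'⟩
              have hnotin : x ∉ xs.toFinset ∩ ys.toFinset := by
                simp [Finset.mem_inter, hxxs, hxys]
              rw [pvMergeCount, if_neg hxy, if_neg hyx, iha ys hxs hys, hset,
                Finset.card_insert_of_notMem hnotin]
              push_cast; ring

-- B's value is the intersection cardinality of the two arrays.
theorem pv_alt_card (arr1 arr2 : List Int) :
    one_set_intersection_alt arr1 arr2 = ((arr1.toFinset ∩ arr2.toFinset).card : Int) := by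
  unfold one_set_intersection_alt
  have h1 := PySem.List.sorted_ofList_pairwise_lt (xs := arr1)
  have h2 := PySem.List.sorted_ofList_pairwise_lt (xs := arr2)
  rw [pv_merge_card _ _ h1 h2]
  have e1 : (PySem.List.sorted (PySem.Set.ofList arr1) (fun x => x) false).toFinset
      = arr1.toFinset := by
    ext z; simp [PySem.List.mem_sorted, PySem.Set.mem_ofList]
  have e2 : (PySem.List.sorted (PySem.Set.ofList arr2) (fun x => x) false).toFinset
      = arr2.toFinset := by
    ext z; simp [PySem.List.mem_sorted, PySem.Set.mem_ofList]
  rw [e1, e2]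

-- ===== VERDICT (by name: the statement is the Claim_ definition above) =====
theorem one_set_intersection_spec : Claim_equal_one_set_intersection := by
  intro arr1 arr2 _
  unfold Spec_one_set_intersection one_set_intersection
  have h := pv_fold_countdown pvStep arr2 ((0 : Int), PySem.Set.ofList arr1)
  simp only [pvStep] at h
  rw [h, pv_loop_count _ _ (PySem.Set.nodup_ofList arr1) 0]
  rw [pv_ofList_toFinset, List.toFinset_reverse, pv_alt_card, Finset.inter_comm]
  ring
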